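-- pv_equiv track=rewrite | github.com/shreyashettykonjadi/chessPGN | src/stable_snapshot_detector.py | piece_map_to_fen_board
-- ===== SOURCE A (Python) =====
-- from typing import Dict, Optional, Tuple, List
--
-- def piece_map_to_fen_board(piece_map: Dict[str, str]) -> str:
--     """
--     Convert piece map {square: piece_label} to FEN board string.
--
--     Piece labels expected: "white_pawn", "black_rook", etc.
--     FEN chars: P, R, N, B, Q, K (white) / p, r, n, b, q, k (black)
--     """
--     PIECE_TO_FEN = {
--         "white_pawn": "P", "white_rook": "R", "white_knight": "N",
--         "white_bishop": "B", "white_queen": "Q", "white_king": "K",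
--         "black_pawn": "p", "black_rook": "r", "black_knight": "n",
--         "black_bishop": "b", "black_queen": "q", "black_king": "k",
--     }
--
--     FILES = ["a", "b", "c", "d", "e", "f", "g", "h"]
--     rows = []
--
--     # FEN ranks go from 8 -> 1
--     for rank in range(8, 0, -1):
--         empty = 0
--         row = ""
--
--         for file in FILES:
--             square = f"{file}{rank}"
--             if square in piece_map:
--                 if empty > 0:
--                     row += str(empty)
--                     empty = 0
--                 label = piece_map[square]
--                 fen_char = PIECE_TO_FEN.get(label, "?")
--                 row += fen_char
--             else:
--                 empty += 1
--
--         if empty > 0: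
--             row += str(empty)
--
--         rows.append(row)
--
--     return "/".join(rows)
-- ===== SOURCE B (Python) =====
-- def piece_map_to_fen_board(piece_map):
--     PIECE_TO_FEN = {
--         "white_pawn": "P", "white_rook": "R", "white_knight": "N",
--         "white_bishop": "B", "white_queen": "Q", "white_king": "K",
--         "black_pawn": "p", "black_rook": "r", "black_knight": "n",
--         "black_bishop": "b", "black_queen": "q", "black_king": "k",
--     }
--
--     def compress(raw):
--         # run-length-encode maximal runs of '.' into their length
--         if raw == "":
--             return ""
--         if raw[0] == ".":
--             k = 1
--             while k < len(raw) and raw[k] == ".":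
--                 k += 1
--             return str(k) + compress(raw[k:])
--         return raw[0] + compress(raw[1:])
--
--     rows = []
--     for rank in range(8, 0, -1):
--         raw = "".join(
--             PIECE_TO_FEN.get(piece_map[f"{f}{rank}"], "?")
--             if f"{f}{rank}" in piece_map else "."
--             for f in "abcdefgh")
--         rows.append(compress(raw))
--     return "/".join(rows)
-- ===== Notes on version B (the rewrite author's own statement) =====
-- stated objective: alternative
-- what changed: B materializes each rank as a raw 8-char string with '.' for empty squares (a comprehension) and then run-length-encodes the dot runs in a separate recursive compress pass, instead of A's interleaved empty-counter state machine inside the file loop.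
import Mathlib
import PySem

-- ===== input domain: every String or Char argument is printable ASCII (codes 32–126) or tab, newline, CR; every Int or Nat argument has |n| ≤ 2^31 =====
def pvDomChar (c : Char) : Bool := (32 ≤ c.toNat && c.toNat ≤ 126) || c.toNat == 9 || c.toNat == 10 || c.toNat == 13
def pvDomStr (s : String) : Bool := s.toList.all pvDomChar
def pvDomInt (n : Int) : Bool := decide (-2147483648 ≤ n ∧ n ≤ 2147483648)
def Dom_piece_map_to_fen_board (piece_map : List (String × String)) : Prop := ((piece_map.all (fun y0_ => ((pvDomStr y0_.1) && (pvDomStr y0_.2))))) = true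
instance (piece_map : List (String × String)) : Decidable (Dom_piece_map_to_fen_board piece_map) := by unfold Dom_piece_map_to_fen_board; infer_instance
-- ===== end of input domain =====

-- B replaces A's interleaved empty-counter state machine by: materialize each rank as a raw
-- 8-char string ('.' for empty), then run-length-encode the dot runs in a separate pass.

-- ===== PORT A =====
def fenTableA : PySem.Dict String String := PySem.Dict.mk
  [("white_pawn", "P"), ("white_rook", "R"), ("white_knight", "N"),
   ("white_bishop", "B"), ("white_queen", "Q"), ("white_king", "K"),
   ("black_pawn", "p"), ("black_rook", "r"), ("black_knight", "n"),
   ("black_bishop", "b"), ("black_queen", "q"), ("black_king", "k")]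

-- the body of A's per-rank loop: fold over FILES carrying (empty, row), then flush the counter
def rowA (d : PySem.Dict String String) (rank : Int) : String :=
  let st := ["a", "b", "c", "d", "e", "f", "g", "h"].foldl
    (fun (st : Int × String) file =>
      let square := file ++ PySem.Int.toStr rank
      match d.get? square with
      | some label =>
          ((0 : Int),
            (if st.1 > 0 then st.2 ++ PySem.Int.toStr st.1 else st.2)
              ++ PySem.Dict.getD fenTableA label "?")
      | none => (st.1 + 1, st.2)) ((0 : Int), "")
  if st.1 > 0 then st.2 ++ PySem.Int.toStr st.1 else st.2

def piece_map_to_fen_board (piece_map : List (String × String)) : String :=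
  PySem.Str.join "/"
    ((PySem.List.pyRange 8 0 (-1)).foldl
      (fun rows rank => rows ++ [rowA (PySem.Dict.mk piece_map) rank]) [])

-- ===== PORT B =====
def fenTableB : PySem.Dict String String := PySem.Dict.mk
  [("white_pawn", "P"), ("white_rook", "R"), ("white_knight", "N"),
   ("white_bishop", "B"), ("white_queen", "Q"), ("white_king", "K"),
   ("black_pawn", "p"), ("black_rook", "r"), ("black_knight", "n"),
   ("black_bishop", "b"), ("black_queen", "q"), ("black_king", "k")]

-- Source B's recursive `compress`, ported on List Char (the chars of the Python str);
-- the python while-loop scanning the dot run is the takeWhile count, raw[k:] the dropWhile.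
def compressL (raw : List Char) : String :=
  match raw with
  | [] => ""
  | c :: t =>
    if c = '.' then
      PySem.Int.toStr ((1 + (t.takeWhile (· == '.')).length : Nat) : Int)
        ++ compressL (t.dropWhile (· == '.'))
    else c.toString ++ compressL t
termination_by raw.length
decreasing_by
  · have := List.length_dropWhile_le (· == '.') t
    simp; omega
  · simp

-- Source B's per-rank comprehension: raw row with '.' for empty squares, then compress
def rowB (d : PySem.Dict String String) (rank : Int) : String :=
  compressL (PySem.Str.join ""
    (("abcdefgh".toList).map (fun f =>
      match d.get? (f.toString ++ PySem.Int.toStr rank) with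
      | some label => PySem.Dict.getD fenTableB label "?"
      | none => "."))).toList

def piece_map_to_fen_board_alt (piece_map : List (String × String)) : String :=
  PySem.Str.join "/"
    ((PySem.List.pyRange 8 0 (-1)).map (fun rank => rowB (PySem.Dict.mk piece_map) rank))

-- ===== PRECONDITION & SPEC =====
def Spec_piece_map_to_fen_board (piece_map : List (String × String)) (out : String) : Prop := out = piece_map_to_fen_board_alt piece_map
instance (piece_map : List (String × String)) (out : String) : Decidable (Spec_piece_map_to_fen_board piece_map out) := by unfold Spec_piece_map_to_fen_board; infer_instance

-- ===== CLAIM (what is proved, stated in full; the proofs are below) =====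
def Claim_equal_piece_map_to_fen_board : Prop := ∀ (piece_map : List (String × String)), Dom_piece_map_to_fen_board piece_map → Spec_piece_map_to_fen_board piece_map (piece_map_to_fen_board piece_map)

-- ===== LEMMAS AND PROOFS =====

-- the FEN char of a label, as a Char (proof-side view of the getD on the table)
def fenCh (label : String) : Char :=
  ((PySem.Dict.getD fenTableA label "?").toList).headD '?'

theorem fenTableB_eq : fenTableB = fenTableA := rfl

-- every table value (and the default "?") is a single non-dot character
theorem getD_fenTableA (label : String) :
    PySem.Dict.getD fenTableA label "?" = (fenCh label).toString ∧ fenCh label ≠ '.' := by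
  unfold fenCh
  cases h : PySem.Dict.get? fenTableA label with
  | none =>
      rw [PySem.Dict.getD_of_get?_eq_none fenTableA "?" h]
      decide
  | some v =>
      rw [PySem.Dict.getD_of_get?_eq_some fenTableA "?" h]
      have hm := PySem.Dict.mem_items_of_get?_eq_some fenTableA h
      simp only [fenTableA, List.mem_cons, List.not_mem_nil, or_false,
        Prod.mk.injEq] at hm
      rcases hm with ⟨-, rfl⟩|⟨-, rfl⟩|⟨-, rfl⟩|⟨-, rfl⟩|⟨-, rfl⟩|⟨-, rfl⟩|⟨-, rfl⟩|⟨-, rfl⟩|⟨-, rfl⟩|⟨-, rfl⟩|⟨-, rfl⟩|⟨-, rfl⟩ <;> decide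

-- proof-side per-cell char: what both programs effectively put on a square
def cellC (d : PySem.Dict String String) (sq : String) : Char :=
  match d.get? sq with
  | some label => fenCh label
  | none => '.'

-- A's interleaved state machine, per char
def stepCh (st : Int × String) (c : Char) : Int × String :=
  if c = '.' then (st.1 + 1, st.2)
  else ((0 : Int), (if st.1 > 0 then st.2 ++ PySem.Int.toStr st.1 else st.2) ++ c.toString)

-- what the state machine emits after the prefix, given e pending empties
def pref : Int → List Char → String
  | e, [] => if e > 0 then PySem.Int.toStr e else ""
  | e, c :: t =>
      if c = '.' then pref (e + 1) t
      else (if e > 0 then PySem.Int.toStr e else "") ++ c.toString ++ pref 0 t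

theorem foldl_stepCh (xs : List Char) : ∀ (e : Int) (r : String),
    (let st := xs.foldl stepCh (e, r);
      if st.1 > 0 then st.2 ++ PySem.Int.toStr st.1 else st.2) = r ++ pref e xs := by
  induction xs with
  | nil =>
      intro e r
      simp only [List.foldl_nil, pref]
      split_ifs <;> simp
  | cons c t ih =>
      intro e r
      simp only [List.foldl_cons, pref, stepCh]
      by_cases hc : c = '.'
      · subst hc; simp [ih]
      · simp only [if_neg hc, ih]
        split_ifs <;> (apply String.ext; simp)

theorem pref_pos (t : List Char) : ∀ e : Int, 0 < e →
    pref e t = PySem.Int.toStr (e + ((t.takeWhile (· == '.')).length : Nat))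
      ++ pref 0 (t.dropWhile (· == '.')) := by
  induction t with
  | nil => intro e he; simp [pref, if_pos he]
  | cons c t ih =>
      intro e he
      by_cases hc : c = '.'
      · subst hc
        rw [show pref e ('.' :: t) = pref (e + 1) t from by simp [pref],
            ih (e + 1) (by omega)]
        simp only [List.takeWhile_cons, List.dropWhile_cons]
        norm_num
        congr 1
        ring_nf
      · have hb : (c == '.') = false := by simpa using hc
        simp only [pref, if_neg hc, List.takeWhile_cons, List.dropWhile_cons, hb,
          if_pos he, Bool.false_eq_true, if_false]
        apply String.ext; simp

theorem compressL_eq_pref (xs : List Char) : compressL xs = pref 0 xs := by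
  fun_induction compressL xs
  case case1 => simp [pref]
  case case2 =>
    rename_i t ih
    rw [show pref 0 ('.' :: t) = pref (0 + 1) t from by simp [pref], zero_add,
        pref_pos t 1 one_pos, ih]
    norm_num
  case case3 =>
    rename_i c t hc ih
    simp only [pref, if_neg hc, ih]
    apply String.ext; simp

theorem rowA_eq_rowB (d : PySem.Dict String String) (rank : Int) :
    rowA d rank = rowB d rank := by
  have hstep : (fun (st : Int × String) file =>
      let square := file ++ PySem.Int.toStr rank
      match d.get? square with
      | some label =>
          ((0 : Int),
            (if st.1 > 0 then st.2 ++ PySem.Int.toStr st.1 else st.2)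
              ++ PySem.Dict.getD fenTableA label "?")
      | none => (st.1 + 1, st.2))
      = fun st file => stepCh st (cellC d (file ++ PySem.Int.toStr rank)) := by
    funext st file
    cases h : d.get? (file ++ PySem.Int.toStr rank) with
    | none => simp [cellC, h, stepCh]
    | some label =>
        obtain ⟨h1, h2⟩ := getD_fenTableA label
        simp [cellC, h, stepCh, h1, h2]
  have hcell : ∀ f : Char,
      (match d.get? (f.toString ++ PySem.Int.toStr rank) with
        | some label => PySem.Dict.getD fenTableB label "?"
        | none => ".")
      = (cellC d (f.toString ++ PySem.Int.toStr rank)).toString := by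
    intro f
    simp only [cellC]
    cases h : d.get? (f.toString ++ PySem.Int.toStr rank) with
    | none => rfl
    | some label => rw [fenTableB_eq]; exact (getD_fenTableA label).1
  have hB : rowB d rank
      = compressL (("abcdefgh".toList).map
          (fun f => cellC d (f.toString ++ PySem.Int.toStr rank))) := by
    unfold rowB
    congr 1
    rw [PySem.Str.toList_join, List.map_map,
        List.map_congr_left (fun f _ => by
          simp only [Function.comp_apply]
          rw [hcell f])]
    simp only [Char.toString_eq_singleton, String.toList_singleton]
    rw [show ("" : String).toList = [] from rfl,
        show (fun f => [cellC d (String.singleton f ++ PySem.Int.toStr rank)])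
          = (fun c => [c]) ∘ (fun f => cellC d (String.singleton f ++ PySem.Int.toStr rank))
          from rfl,
        ← List.map_map]
    exact PySem.Chars.join_nil_singletons _
  rw [hB, compressL_eq_pref]
  unfold rowA
  rw [hstep, show (fun (st : Int × String) file =>
        stepCh st (cellC d (file ++ PySem.Int.toStr rank)))
      = (fun st file => stepCh st ((fun s => cellC d (s ++ PySem.Int.toStr rank)) file))
      from rfl, ← List.foldl_map]
  rw [foldl_stepCh _ 0 ""]
  rw [String.empty_append]
  congr 1

-- ===== VERDICT (by name: the statement is the Claim_ definition above) =====
theorem piece_map_to_fen_board_spec : Claim_equal_piece_map_to_fen_board := by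
  intro pm _
  unfold Spec_piece_map_to_fen_board piece_map_to_fen_board piece_map_to_fen_board_alt
  rw [PySem.List.foldl_append_singleton_eq_map]
  exact congrArg _ (List.map_congr_left (fun rank _ => rowA_eq_rowB _ rank))
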